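-- pv_equiv track=rewrite | github.com/pjpankowski/https-github.com-pjpankowski-Web-Inspector_1.1-STREAMLIT-Version-blob-main-wealth-crawler.py | wealth-crawler.py | prioritize_links
-- ===== SOURCE A (Python) =====
-- def prioritize_links(links):
--     """Prioritize links based on URL patterns"""
--     priority_keywords = [
--         'about', 'capabilities', 'solutions', 'services', 'products',
--         'investment', 'approach', 'strategy', 'team', 'esg',
--         'sustainability', 'technology', 'platform'
--     ]
--
--     prioritized = []
--     normal = []
--
--     for link in links:
--         link_lower = link.lower()
--         if any(keyword in link_lower for keyword in priority_keywords):
--             prioritized.append(link)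
--         else:
--             normal.append(link)
--
--     return prioritized + normal
-- ===== SOURCE B (Python) =====
-- def prioritize_links(links):
--     """Prioritize links based on URL patterns"""
--     priority_keywords = [
--         'about', 'capabilities', 'solutions', 'services', 'products',
--         'investment', 'approach', 'strategy', 'team', 'esg',
--         'sustainability', 'technology', 'platform'
--     ]
--
--     def key(link):
--         link_lower = link.lower()
--         return 0 if any(keyword in link_lower for keyword in priority_keywords) else 1
--
--     return sorted(links, key=key)
-- ===== Notes on version B (the rewrite author's own statement) =====
-- stated objective: idiomatic
-- what changed: Replaces the two-accumulator partition-and-concatenate loop with a single stable sorted() call keyed by a binary match flag; stability preserves the original order within each group.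
import Mathlib
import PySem

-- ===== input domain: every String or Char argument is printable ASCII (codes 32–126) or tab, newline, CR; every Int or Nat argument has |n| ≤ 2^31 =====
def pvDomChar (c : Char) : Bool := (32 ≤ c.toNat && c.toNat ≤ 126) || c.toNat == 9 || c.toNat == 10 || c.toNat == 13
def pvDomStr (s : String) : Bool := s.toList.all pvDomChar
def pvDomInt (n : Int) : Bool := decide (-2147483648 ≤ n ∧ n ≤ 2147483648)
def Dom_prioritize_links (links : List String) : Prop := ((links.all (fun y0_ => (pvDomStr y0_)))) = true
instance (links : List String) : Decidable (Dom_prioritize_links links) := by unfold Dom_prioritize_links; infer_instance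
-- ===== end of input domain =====

-- B replaces A's two-accumulator partition loop with one stable sort by a binary match key (idiomatic; same result, same order).


-- shared module constant: the keyword list both Pythons spell out verbatim
def pvPriorityKeywords : List String :=
  ["about", "capabilities", "solutions", "services", "products",
   "investment", "approach", "strategy", "team", "esg",
   "sustainability", "technology", "platform"]

-- ===== PORT A =====
-- A: one pass appending each link to `prioritized` or `normal`, then concatenate.
def prioritize_links (links : List String) : List String :=
  let r := links.foldl
    (fun (acc : List String × List String) link =>
      let link_lower := PySem.Str.lower link
      if pvPriorityKeywords.any (fun keyword => PySem.Str.isIn keyword link_lower) then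
        (acc.1 ++ [link], acc.2)
      else
        (acc.1, acc.2 ++ [link]))
    ([], [])
  r.1 ++ r.2

-- ===== PORT B =====
-- B: stable sort by binary key (0 = some keyword occurs in link.lower(), 1 = none does)
def pvLinkKey (link : String) : Int :=
  let link_lower := PySem.Str.lower link
  if pvPriorityKeywords.any (fun keyword => PySem.Str.isIn keyword link_lower) then 0 else 1

def prioritize_links_alt (links : List String) : List String :=
  PySem.List.sorted links pvLinkKey false

-- ===== PRECONDITION & SPEC =====
def Spec_prioritize_links (links : List String) (out : List String) : Prop := out = prioritize_links_alt links
instance (links : List String) (out : List String) : Decidable (Spec_prioritize_links links out) := by unfold Spec_prioritize_links; infer_instance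

-- ===== CLAIM (what is proved, stated in full; the proofs are below) =====
def Claim_equal_prioritize_links : Prop := ∀ (links : List String), Dom_prioritize_links links → Spec_prioritize_links links (prioritize_links links)

-- ===== LEMMAS AND PROOFS =====

-- the match test both programs use
def pvMatch (link : String) : Bool :=
  pvPriorityKeywords.any (fun keyword => PySem.Str.isIn keyword (PySem.Str.lower link))

theorem pvLinkKey_eq (link : String) : pvLinkKey link = if pvMatch link then 0 else 1 := by
  simp [pvLinkKey, pvMatch]

-- A's loop accumulates the two filters
theorem pvA_inv (links P N : List String) :
    links.foldl
      (fun (acc : List String × List String) link =>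
        let link_lower := PySem.Str.lower link
        if pvPriorityKeywords.any (fun keyword => PySem.Str.isIn keyword link_lower) then
          (acc.1 ++ [link], acc.2)
        else
          (acc.1, acc.2 ++ [link])) (P, N)
    = (P ++ links.filter pvMatch, N ++ links.filter (fun l => !pvMatch l)) := by
  simp only [show (fun (acc : List String × List String) link =>
      let link_lower := PySem.Str.lower link
      if pvPriorityKeywords.any (fun keyword => PySem.Str.isIn keyword link_lower) then
        (acc.1 ++ [link], acc.2)
      else
        (acc.1, acc.2 ++ [link]))
    = (fun (acc : List String × List String) link =>
        if pvMatch link then (acc.1 ++ [link], acc.2) else (acc.1, acc.2 ++ [link])) from rfl]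
  induction links generalizing P N with
  | nil => simp
  | cons x rest ih =>
    rw [List.foldl_cons]
    by_cases hx : pvMatch x = true
    · simp only [hx, if_true]
      rw [ih]
      simp [hx]
    · simp only [Bool.not_eq_true] at hx
      simp only [hx, Bool.false_eq_true, if_false]
      rw [ih]
      simp [hx]

-- insertBy skips a prefix it is not "before"
theorem pv_insertBy_append (before : String → String → Bool) (x : String) (P N : List String)
    (hP : ∀ p ∈ P, before x p = false) :
    PySem.List.insertBy before x (P ++ N) = P ++ PySem.List.insertBy before x N := by
  induction P with
  | nil => simp
  | cons p ps ih =>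
    have hp := hP p (by simp)
    simp [PySem.List.insertBy, hp]
    exact ih (fun q hq => hP q (by simp [hq]))

-- B's insertion-sort loop accumulates the same two filters
theorem pvB_inv (links P N : List String)
    (hP : ∀ p ∈ P, pvMatch p = true) (hN : ∀ n ∈ N, pvMatch n = false) :
    links.foldl
      (fun acc x => PySem.List.insertBy (fun a b => decide (pvLinkKey a < pvLinkKey b)) x acc)
      (P ++ N)
    = (P ++ links.filter pvMatch) ++ (N ++ links.filter (fun l => !pvMatch l)) := by
  induction links generalizing P N with
  | nil => simp
  | cons x rest ih =>
    by_cases hx : pvMatch x = true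
    · have h1 : PySem.List.insertBy (fun a b => decide (pvLinkKey a < pvLinkKey b)) x (P ++ N)
          = P ++ PySem.List.insertBy (fun a b => decide (pvLinkKey a < pvLinkKey b)) x N := by
        apply pv_insertBy_append
        intro p hp
        simp [pvLinkKey_eq, hx, hP p hp]
      have hstep : PySem.List.insertBy (fun a b => decide (pvLinkKey a < pvLinkKey b)) x (P ++ N)
          = (P ++ [x]) ++ N := by
        rw [h1]
        cases N with
        | nil => simp [PySem.List.insertBy]
        | cons n ns =>
          have hn := hN n (by simp)
          simp [PySem.List.insertBy, pvLinkKey_eq, hx, hn]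
      rw [List.foldl_cons, hstep, ih (P ++ [x]) N
        (fun p hp => by rcases List.mem_append.mp hp with h | h
                        · exact hP p h
                        · simp at h; simpa [h] using hx) hN]
      simp [hx]
    · have hstep : PySem.List.insertBy (fun a b => decide (pvLinkKey a < pvLinkKey b)) x (P ++ N)
          = P ++ (N ++ [x]) := by
        have hall : ∀ y ∈ P ++ N, (fun a b => decide (pvLinkKey a < pvLinkKey b)) x y = false := by
          intro y _
          simp only [Bool.not_eq_true] at hx
          simp [pvLinkKey_eq, hx]
          split <;> omega
        rw [PySem.List.insertBy_of_forall_not_before _ _ _ hall]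
        simp
      rw [List.foldl_cons, hstep, ih P (N ++ [x]) hP
        (fun n hn => by rcases List.mem_append.mp hn with h | h
                        · exact hN n h
                        · simp only [Bool.not_eq_true] at hx
                          simp at h; simpa [h] using hx)]
      simp only [Bool.not_eq_true] at hx
      simp [hx]

-- ===== VERDICT (by name: the statement is the Claim_ definition above) =====
theorem prioritize_links_spec : Claim_equal_prioritize_links := by
  intro links _
  unfold Spec_prioritize_links prioritize_links prioritize_links_alt
  rw [PySem.List.sorted_eq_foldl_insertBy]
  have hB := pvB_inv links [] [] (by simp) (by simp)
  have hA := pvA_inv links [] []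
  simp only [List.nil_append, List.append_nil] at hA hB
  rw [hB, hA]
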